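-- pv_equiv track=rewrite | github.com/lab156/arxivDownload | embed/NER with LSTM CRF.py | tf_bio_tagger
-- ===== SOURCE A (Python) =====
-- def tf_bio_tagger(tf_pred, tag_def='DFNDUM', tag_o = 'O'):
--     '''
--     Convert a T/F (binary) Sequence into a BIO tag sequence
--     [True, False, False] -> [B-DFNDUM, O, O]
--     '''
--     begin_tag = 'B-' + tag_def
--     inside_tag = 'I-' + tag_def
--     out_tag = tag_o
--     return_tags = []
--     for ind, x in enumerate(tf_pred):
--         if x:
--             if ind > 0:
--                 ret = inside_tag if tf_pred[ind - 1] else begin_tag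
--                 return_tags.append(ret)
--             else:
--                 return_tags.append(begin_tag)
--         else:
--             return_tags.append(out_tag)
--     return return_tags
-- ===== SOURCE B (Python) =====
-- def tf_bio_tagger(tf_pred, tag_def='DFNDUM', tag_o='O'):
--     '''
--     Convert a T/F (binary) Sequence into a BIO tag sequence
--     by consuming the input one maximal run of equal truthiness at a time:
--     a truthy run of length n contributes [B-tag] + [I-tag]*(n-1),
--     a falsy run of length n contributes [tag_o]*n.
--     '''
--     begin_tag = 'B-' + tag_def
--     inside_tag = 'I-' + tag_def
--     out = []
--     rest = list(tf_pred)
--     while rest: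
--         k = bool(rest[0])
--         n = 0
--         while n < len(rest) and bool(rest[n]) == k:
--             n += 1
--         if k:
--             out += [begin_tag] + [inside_tag] * (n - 1)
--         else:
--             out += [tag_o] * n
--         rest = rest[n:]
--     return out
-- ===== Notes on version B (the rewrite author's own statement) =====
-- stated objective: alternative
-- what changed: Replaces A's per-index loop that re-reads tf_pred[ind-1] at every position with a run-based recursion: split the input into maximal runs of equal truthiness and emit each run's tags (begin + replicated inside, or replicated out) in one piece.
import Mathlib
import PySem

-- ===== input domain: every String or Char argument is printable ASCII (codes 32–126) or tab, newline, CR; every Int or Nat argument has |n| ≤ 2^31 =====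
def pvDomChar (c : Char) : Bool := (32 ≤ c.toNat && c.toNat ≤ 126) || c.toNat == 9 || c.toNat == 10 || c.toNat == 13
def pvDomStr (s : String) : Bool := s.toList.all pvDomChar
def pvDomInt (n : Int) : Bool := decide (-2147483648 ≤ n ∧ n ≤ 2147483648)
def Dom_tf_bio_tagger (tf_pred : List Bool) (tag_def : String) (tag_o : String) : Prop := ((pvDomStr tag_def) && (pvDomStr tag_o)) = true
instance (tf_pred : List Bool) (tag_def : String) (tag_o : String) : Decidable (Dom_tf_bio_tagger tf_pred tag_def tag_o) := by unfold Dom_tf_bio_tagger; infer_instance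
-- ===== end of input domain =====

-- B replaces A's per-index loop (which re-reads tf_pred[ind-1]) by splitting the input into
-- maximal runs of equal truthiness and emitting each run's tags at once (objective: alternative).

-- ===== PORT A =====
-- Python: 'ret = inside_tag if tf_pred[ind - 1] else begin_tag'; ind-1 is always in range
-- (0 < ind ≤ len), so '.getD false' is exact there.
def tf_bio_tagger (tf_pred : List Bool) (tag_def : String) (tag_o : String) : List String :=
  let begin_tag := "B-" ++ tag_def
  let inside_tag := "I-" ++ tag_def
  let out_tag := tag_o
  (PySem.List.enumerate tf_pred 0).foldl
    (fun return_tags p =>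
      if p.2 then
        if p.1 > 0 then
          return_tags ++ [if (PySem.List.pyGet? tf_pred (p.1 - 1)).getD false then inside_tag else begin_tag]
        else
          return_tags ++ [begin_tag]
      else
        return_tags ++ [out_tag])
    []

-- ===== PORT B =====
-- the inner while loop of Source B counts the longest prefix of rest with truthiness k, i.e.
-- n = (rest.takeWhile (· == k)).length; 'rest[n:]' with 0 ≤ n is List.drop n;
-- the outer while loop is this tail recursion on rest with accumulator out.
def tf_bio_tagger_alt_go (begin_tag inside_tag tag_o : String) (rest : List Bool) (out : List String) : List String :=
  match rest with
  | [] => out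
  | x :: xs =>
    let k := x
    let n := ((x :: xs).takeWhile (fun y => y == k)).length
    let piece := if k then begin_tag :: List.replicate (n - 1) inside_tag
                 else List.replicate n tag_o
    tf_bio_tagger_alt_go begin_tag inside_tag tag_o ((x :: xs).drop n) (out ++ piece)
  termination_by rest.length
  decreasing_by
    simp only [List.takeWhile, beq_self_eq_true, List.length_drop, List.length_cons]
    omega

def tf_bio_tagger_alt (tf_pred : List Bool) (tag_def : String) (tag_o : String) : List String :=
  let begin_tag := "B-" ++ tag_def
  let inside_tag := "I-" ++ tag_def
  tf_bio_tagger_alt_go begin_tag inside_tag tag_o tf_pred []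

-- ===== PRECONDITION & SPEC =====
def Spec_tf_bio_tagger (tf_pred : List Bool) (tag_def : String) (tag_o : String) (out : List String) : Prop := out = tf_bio_tagger_alt tf_pred tag_def tag_o
instance (tf_pred : List Bool) (tag_def : String) (tag_o : String) (out : List String) : Decidable (Spec_tf_bio_tagger tf_pred tag_def tag_o out) := by unfold Spec_tf_bio_tagger; infer_instance

-- ===== CLAIM (what is proved, stated in full; the proofs are below) =====
def Claim_equal_tf_bio_tagger : Prop := ∀ (tf_pred : List Bool) (tag_def : String) (tag_o : String), Dom_tf_bio_tagger tf_pred tag_def tag_o → Spec_tf_bio_tagger tf_pred tag_def tag_o (tf_bio_tagger tf_pred tag_def tag_o)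

-- ===== LEMMAS AND PROOFS =====

-- reference function both ports are reduced to: tag each element from the previous element's truthiness
def mapPrev (b i o : String) (prev : Bool) : List Bool → List String
  | [] => []
  | x :: xs => (if x then (if prev then i else b) else o) :: mapPrev b i o x xs

theorem dropWhile_eq_drop_length_takeWhile {α : Type} (p : α → Bool) (l : List α) :
    l.dropWhile p = l.drop (l.takeWhile p).length := by
  induction l with
  | nil => simp
  | cons x xs ih => by_cases h : p x <;> simp [List.dropWhile, List.takeWhile, h, ih]

theorem mapPrev_append (b i o : String) (a c : List Bool) (prev : Bool) :
    mapPrev b i o prev (a ++ c) = mapPrev b i o prev a ++ mapPrev b i o (a.getLastD prev) c := by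
  induction a generalizing prev with
  | nil => simp [mapPrev]
  | cons x xs ih =>
    simp only [List.cons_append, mapPrev, ih]
    rw [List.getLastD_cons]

theorem mapPrev_false_run (b i o : String) (l : List Bool) (prev : Bool)
    (h : ∀ y ∈ l, y = false) : mapPrev b i o prev l = List.replicate l.length o := by
  induction l generalizing prev with
  | nil => rfl
  | cons x xs ih =>
    have hx : x = false := h x (by simp)
    simp [mapPrev, hx, ih _ (fun y hy => h y (by simp [hy])), List.replicate_succ]

theorem mapPrev_true_run (b i o : String) (l : List Bool)
    (h : ∀ y ∈ l, y = true) : mapPrev b i o true l = List.replicate l.length i := by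
  induction l with
  | nil => rfl
  | cons x xs ih =>
    have hx : x = true := h x (by simp)
    subst hx
    simp [mapPrev, ih (fun y hy => h y (by simp [hy])), List.replicate_succ]

theorem getLastD_of_all_eq (l : List Bool) (x prev : Bool) (hne : l ≠ [])
    (h : ∀ y ∈ l, y = x) : l.getLastD prev = x := by
  induction l generalizing prev with
  | nil => exact absurd rfl hne
  | cons z zs ih =>
    rcases zs with _ | ⟨w, ws⟩
    · simpa using h z (by simp)
    · rw [List.getLastD_cons]
      exact ih z (by simp) (fun y hy => h y (by simp [hy]))

-- B equals mapPrev, provided the pending previous truthiness does not continue into the head run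
theorem go_eq_mapPrev (b i o : String) (l : List Bool) (prev : Bool) (acc : List String)
    (h : prev = true → l.head? ≠ some true) :
    tf_bio_tagger_alt_go b i o l acc = acc ++ mapPrev b i o prev l := by
  match l with
  | [] => simp [tf_bio_tagger_alt_go, mapPrev]
  | x :: xs =>
    rw [tf_bio_tagger_alt_go]
    set run := (x :: xs).takeWhile (fun y => y == x) with hrun
    set rest := (x :: xs).drop run.length with hrestd
    have hrest : rest = (x :: xs).dropWhile (fun y => y == x) := by
      rw [hrestd, dropWhile_eq_drop_length_takeWhile]
    have hsplit : x :: xs = run ++ rest := by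
      rw [hrest, hrun, List.takeWhile_append_dropWhile]
    have hrun_all : ∀ y ∈ run, y = x := fun y hy => by simpa using List.mem_takeWhile_imp hy
    have hrun_cons : run = x :: xs.takeWhile (fun y => y == x) := by
      rw [hrun]; simp [List.takeWhile]
    have hrun_ne : run ≠ [] := by rw [hrun_cons]; simp
    have hlt : rest.length < (x :: xs).length := by
      rw [hrestd]
      have : 1 ≤ run.length := by rw [hrun_cons]; simp
      simp only [List.length_drop, List.length_cons]
      omega
    have hheadrest : x = true → rest.head? ≠ some true := by
      intro hx hcontra
      have t := List.head?_dropWhile_not (fun y => y == x) (x :: xs)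
      rw [← hrest, hcontra] at t
      simp [hx] at t
    have hih := fun acc => go_eq_mapPrev b i o rest x acc hheadrest
    have hlast : run.getLastD prev = x := getLastD_of_all_eq run x prev hrun_ne hrun_all
    conv_rhs => rw [hsplit]
    rw [mapPrev_append, hlast, hih, ← List.append_assoc]
    cases x with
    | false =>
      rw [mapPrev_false_run b i o run prev (by simpa using hrun_all)]
      simp
    | true =>
      have hprev : prev = false := by
        cases prev
        · rfl
        · exact absurd (h rfl) (by simp)
      rw [hprev, hrun_cons, mapPrev]
      have htail : mapPrev b i o true (xs.takeWhile (fun y => y == true)) =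
          List.replicate (xs.takeWhile (fun y => y == true)).length i :=
        mapPrev_true_run b i o _ (fun y hy => by simpa using List.mem_takeWhile_imp hy)
      rw [htail]
      simp
  termination_by l.length
  decreasing_by exact hlt

-- A equals mapPrev
theorem a_eq_mapPrev (bt it o : String) (orig : List Bool) :
    ∀ (l : List Bool) (s : Nat), orig.drop s = l →
      ∀ prev : Bool, (s = 0 → prev = false) →
        (0 < s → PySem.List.pyGet? orig ((s : Int) - 1) = some prev) →
      (PySem.List.enumerate l (s : Int)).map
        (fun p => if p.2 then
            (if p.1 > 0 then (if (PySem.List.pyGet? orig (p.1 - 1)).getD false then it else bt) else bt)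
          else o)
        = mapPrev bt it o prev l := by
  intro l
  induction l with
  | nil => intro s _ prev _ _; simp [PySem.List.enumerate, mapPrev]
  | cons x xs ih =>
    intro s hdrop prev h0 hpos
    rw [PySem.List.enumerate_cons, List.map_cons, mapPrev]
    have hdrop' : orig.drop (s + 1) = xs := by
      rw [← List.tail_drop, hdrop]
      rfl
    have hget : PySem.List.pyGet? orig ((s : Int)) = some x := by
      rw [PySem.List.pyGet?_natCast]
      rw [← List.head?_drop, hdrop]
      rfl
    have htail := ih (s + 1) hdrop' x (by omega)
      (by intro _; push_cast; simpa using hget)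
    have hhead : (if x then
        (if (s : Int) > 0 then
          (if (PySem.List.pyGet? orig ((s : Int) - 1)).getD false then it else bt) else bt)
        else o) = (if x then (if prev then it else bt) else o) := by
      rcases Nat.eq_zero_or_pos s with hs | hs
      · subst hs
        rw [h0 rfl]
        norm_num
      · rw [hpos hs]
        have hpos' : (s : Int) > 0 := by exact_mod_cast hs
        rw [if_pos hpos']
        rfl
    rw [← htail]
    push_cast
    simp only [hhead]

-- ===== VERDICT (by name: the statement is the Claim_ definition above) =====
theorem tf_bio_tagger_spec : Claim_equal_tf_bio_tagger := by
  intro tf_pred tag_def tag_o _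
  unfold Spec_tf_bio_tagger tf_bio_tagger tf_bio_tagger_alt
  have hfun : (fun (return_tags : List String) (p : Int × Bool) =>
      if p.2 then
        if p.1 > 0 then
          return_tags ++ [if (PySem.List.pyGet? tf_pred (p.1 - 1)).getD false then "I-" ++ tag_def else "B-" ++ tag_def]
        else return_tags ++ ["B-" ++ tag_def]
      else return_tags ++ [tag_o]) =
      (fun (return_tags : List String) (p : Int × Bool) => return_tags ++
        [if p.2 then
            (if p.1 > 0 then (if (PySem.List.pyGet? tf_pred (p.1 - 1)).getD false then "I-" ++ tag_def else "B-" ++ tag_def) else "B-" ++ tag_def)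
          else tag_o]) := by
    funext acc p
    by_cases h2 : p.2 <;> by_cases h1 : p.1 > 0 <;> simp [h2, h1]
  simp only [hfun, PySem.List.foldl_append_singleton_eq_map, List.nil_append]
  have hA := a_eq_mapPrev ("B-" ++ tag_def) ("I-" ++ tag_def) tag_o tf_pred tf_pred 0 (by simp)
    false (fun _ => rfl) (by omega)
  have hB := go_eq_mapPrev ("B-" ++ tag_def) ("I-" ++ tag_def) tag_o tf_pred false [] (by simp)
  simp only [Nat.cast_zero] at hA
  rw [hA, hB, List.nil_append]
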